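-- pv_equiv track=rewrite | github.com/clivepato93/Edabit_challenges | Python/Hard/check.py | check
-- ===== SOURCE A (Python) =====
-- import collections
--
-- def check(lst):
--
--     x=[sorted(lst),sorted(lst,reverse=True)]
--     for i in range(1,len(lst)):
--         lst1=collections.deque(lst)
--         lst2=collections.deque(lst)
--         lst1.rotate(i)
--         lst2.rotate(-i)
--         c,d=list(lst1),list(lst2)
--         if c in x or d in x:
--             return "YES"
--
--     return "NO"
-- ===== SOURCE B (Python) =====
-- def check(lst):
--     n = len(lst)
--     if n < 2:
--         return "NO"
--     d = a = 0
--     for x, y in zip(lst, lst[1:]):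
--         if x > y:
--             d += 1
--         elif x < y:
--             a += 1
--     if d == 0 and a == 0:
--         return "YES"
--     if d == 1 and lst[-1] <= lst[0]:
--         return "YES"
--     if a == 1 and lst[-1] >= lst[0]:
--         return "YES"
--     return "NO"
-- ===== Notes on version B (the rewrite author's own statement) =====
-- stated objective: faster
-- what changed: A tries every nontrivial rotation of the list (built via deques) and compares each against the sorted and reverse-sorted copies; B makes one pass counting strict ascents/descents between adjacent elements and decides by the classic characterisation: a list is a nontrivial rotation of its sorted (resp. reverse-sorted) version iff it is constant, or has exactly one strict descent (resp. ascent) and its last element compares suitably with its first.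
import Mathlib
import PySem

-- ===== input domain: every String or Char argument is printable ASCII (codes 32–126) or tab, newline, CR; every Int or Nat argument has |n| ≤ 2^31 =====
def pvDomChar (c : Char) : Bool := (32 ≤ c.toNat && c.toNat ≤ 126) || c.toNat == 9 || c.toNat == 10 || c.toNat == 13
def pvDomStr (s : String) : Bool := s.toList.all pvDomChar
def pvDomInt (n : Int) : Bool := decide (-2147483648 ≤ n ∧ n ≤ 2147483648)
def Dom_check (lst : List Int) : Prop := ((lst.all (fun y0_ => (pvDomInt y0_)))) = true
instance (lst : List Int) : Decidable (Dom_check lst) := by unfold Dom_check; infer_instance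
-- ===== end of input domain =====

-- B replaces A's try-every-rotation scan with one adjacent-pass counting strict ascents/descents (objective: faster).

-- ===== PORT A =====
/-- exact model of `collections.deque.rotate(k)` on a deque holding `xs`:
    right rotation by `k mod len(xs)` (Python `%`: floored, sign of the divisor). -/
def pyDequeRotate (xs : List Int) (k : Int) : List Int :=
  if xs.length = 0 then xs
  else
    let m := (PySem.Int.mod k (xs.length : Int)).toNat
    xs.drop (xs.length - m) ++ xs.take (xs.length - m)

def check (lst : List Int) : String :=
  let x : List (List Int) :=
    [PySem.List.sorted lst (fun v => v), PySem.List.sorted lst (fun v => v) true]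
  if (PySem.List.pyRange 1 (lst.length : Int) 1).any (fun i =>
      let c := pyDequeRotate lst i
      let d := pyDequeRotate lst (-i)
      decide (c ∈ x) || decide (d ∈ x))
  then "YES" else "NO"

-- ===== PORT B =====
def check_alt (lst : List Int) : String :=
  if lst.length < 2 then "NO"
  else
    let da := (lst.zip (lst.drop 1)).foldl
      (fun (p : Int × Int) (xy : Int × Int) =>
        if xy.2 < xy.1 then (p.1 + 1, p.2)
        else if xy.1 < xy.2 then (p.1, p.2 + 1)
        else p) ((0 : Int), (0 : Int))
    let first := PySem.List.pyGetD lst 0 0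
    let lastv := PySem.List.pyGetD lst (-1) 0
    if da.1 = 0 ∧ da.2 = 0 then "YES"
    else if da.1 = 1 ∧ lastv ≤ first then "YES"
    else if da.2 = 1 ∧ first ≤ lastv then "YES"
    else "NO"

-- ===== PRECONDITION & SPEC =====
def Spec_check (lst : List Int) (out : String) : Prop := out = check_alt lst
instance (lst : List Int) (out : String) : Decidable (Spec_check lst out) := by unfold Spec_check; infer_instance

-- ===== CLAIM (what is proved, stated in full; the proofs are below) =====
def Claim_equal_check : Prop := ∀ (lst : List Int), Dom_check lst → Spec_check lst (check lst)

-- ===== LEMMAS AND PROOFS =====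

/-- number of adjacent pairs violating `R`. -/
def pvBadCount (R : Int → Int → Bool) (l : List Int) : Nat :=
  (l.zip l.tail).countP (fun p => !R p.1 p.2)

/-- every adjacent pair satisfies `R`. -/
def pvAdj (R : Int → Int → Bool) (l : List Int) : Prop :=
  ∀ p ∈ l.zip l.tail, R p.1 p.2 = true

lemma pv_getLastD_cons (x : Int) (v : List Int) (h : v ≠ []) :
    (x :: v).getLastD 0 = v.getLastD 0 := by
  cases v with
  | nil => exact absurd rfl h
  | cons a t => simp [List.getLastD_eq_getLast?]

lemma pv_headD_append (v u : List Int) (h : v ≠ []) : (v ++ u).headD 0 = v.headD 0 := by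
  cases v with
  | nil => exact absurd rfl h
  | cons a t => rfl

lemma pv_getLastD_append (v u : List Int) (h : u ≠ []) :
    (v ++ u).getLastD 0 = u.getLastD 0 := by
  induction v with
  | nil => rfl
  | cons x v ih =>
    have hne : v ++ u ≠ [] := by
      intro hc
      rcases List.append_eq_nil_iff.mp hc with ⟨-, hu⟩
      exact h hu
    calc ((x :: v) ++ u).getLastD 0 = (x :: (v ++ u)).getLastD 0 := by simp
      _ = (v ++ u).getLastD 0 := pv_getLastD_cons x (v ++ u) hne
      _ = u.getLastD 0 := ih

lemma pv_getLast_eq_getLastD (l : List Int) (h : l ≠ []) : l.getLast h = l.getLastD 0 := by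
  rw [List.getLastD_eq_getLast?, List.getLast?_eq_getLast h]
  rfl

lemma pv_zipTail_append (v u : List Int) (hv : v ≠ []) (hu : u ≠ []) :
    (v ++ u).zip (v ++ u).tail
      = v.zip v.tail ++ ((v.getLastD 0, u.headD 0) :: u.zip u.tail) := by
  induction v with
  | nil => exact absurd rfl hv
  | cons x v ih =>
    cases v with
    | nil =>
      cases u with
      | nil => exact absurd rfl hu
      | cons y u' => simp
    | cons z v' =>
      have h' := ih (by simp)
      have hlast : ((x :: z :: v').getLastD 0) = ((z :: v').getLastD 0) :=
        pv_getLastD_cons x (z :: v') (by simp)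
      calc ((x :: z :: v') ++ u).zip ((x :: z :: v') ++ u).tail
          = (x, z) :: (((z :: v') ++ u).zip ((z :: v') ++ u).tail) := by simp
        _ = (x, z) :: ((z :: v').zip (z :: v').tail
              ++ (((z :: v').getLastD 0, u.headD 0) :: u.zip u.tail)) := by rw [h']
        _ = (x :: z :: v').zip (x :: z :: v').tail
              ++ (((x :: z :: v').getLastD 0, u.headD 0) :: u.zip u.tail) := by
            rw [hlast]; simp

lemma pv_adj_iff_count (R : Int → Int → Bool) (l : List Int) :
    pvAdj R l ↔ pvBadCount R l = 0 := by
  unfold pvAdj pvBadCount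
  rw [List.countP_eq_zero]
  constructor
  · intro h p hp
    simp [h p hp]
  · intro h p hp
    have := h p hp
    simpa using this

lemma pv_pairwise_of_adj (R : Int → Int → Bool)
    (htrans : ∀ a b c, R a b = true → R b c = true → R a c = true) :
    ∀ l : List Int, pvAdj R l → l.Pairwise (fun a b => R a b = true) := by
  intro l
  induction l with
  | nil => intro _; simp
  | cons x l ih =>
    intro h
    have hl : pvAdj R l := by
      intro p hp
      apply h
      cases l with
      | nil => simp at hp
      | cons y t =>
        rw [show (x :: y :: t).zip (x :: y :: t).tail = (x, y) :: ((y :: t).zip t) from rfl]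
        exact List.mem_cons_of_mem _ hp
    have hpl := ih hl
    rw [List.pairwise_cons]
    refine ⟨?_, hpl⟩
    intro y hy
    cases l with
    | nil => simp at hy
    | cons z t =>
      have hxz : R x z = true := by
        apply h (x, z)
        rw [show (x :: z :: t).zip (x :: z :: t).tail = (x, z) :: ((z :: t).zip t) from rfl]
        exact List.mem_cons_self
      rcases List.mem_cons.mp hy with rfl | hyt
      · exact hxz
      · have hzy : R z y = true := (List.pairwise_cons.mp hpl).1 y hyt
        exact htrans _ _ _ hxz hzy

lemma pv_adj_of_pairwise (R : Int → Int → Bool) :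
    ∀ l : List Int, l.Pairwise (fun a b => R a b = true) → pvAdj R l := by
  intro l
  induction l with
  | nil => intro _ p hp; simp at hp
  | cons x l ih =>
    intro h p hp
    cases l with
    | nil => simp at hp
    | cons y t =>
      rw [show (x :: y :: t).zip (x :: y :: t).tail = (x, y) :: ((y :: t).zip t) from rfl] at hp
      rcases List.mem_cons.mp hp with rfl | hp'
      · exact (List.pairwise_cons.mp h).1 y (by simp)
      · exact ih (List.pairwise_cons.mp h).2 p hp'

lemma pv_all_eq (R : Int → Int → Bool)
    (htrans : ∀ a b c, R a b = true → R b c = true → R a c = true)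
    (hanti : ∀ a b, R a b = true → R b a = true → a = b)
    (l : List Int) (hl : l ≠ []) (hadj : pvAdj R l)
    (hback : R (l.getLastD 0) (l.headD 0) = true) :
    ∀ x ∈ l, x = l.headD 0 := by
  have hpw := pv_pairwise_of_adj R htrans l hadj
  cases l with
  | nil => exact absurd rfl hl
  | cons h t =>
    have hne : (h :: t) ≠ [] := by simp
    have hLD : (h :: t).getLastD 0 = (h :: t).getLast hne :=
      (pv_getLast_eq_getLastD _ hne).symm
    have hsplit := List.dropLast_append_getLast hne
    have hpw2 : ((h :: t).dropLast ++ [(h :: t).getLast hne]).Pairwise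
        (fun a b => R a b = true) := by rw [hsplit]; exact hpw
    have hdrop : ∀ x ∈ (h :: t).dropLast, R x ((h :: t).getLast hne) = true := by
      intro x hx
      exact (List.pairwise_append.mp hpw2).2.2 x hx _ (by simp)
    have hLh : R ((h :: t).getLast hne) h = true := by
      rw [← hLD]; simpa using hback
    intro x hx
    rcases List.mem_cons.mp hx with rfl | hxt
    · rfl
    · have hhx : R h x = true := (List.pairwise_cons.mp hpw).1 x hxt
      have hxh : R x h = true := by
        have hx' : x ∈ (h :: t).dropLast ++ [(h :: t).getLast hne] := by rw [hsplit]; exact hx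
        rcases List.mem_append.mp hx' with hx1 | hx2
        · exact htrans _ _ _ (hdrop x hx1) hLh
        · have : x = (h :: t).getLast hne := by simpa using hx2
          rw [this]; exact hLh
      exact (hanti h x hhx hxh).symm

lemma pv_rep (l : List Int) (h : ∀ p ∈ l.zip l.tail, p.1 = p.2) :
    ∀ x ∈ l, x = l.headD 0 := by
  induction l with
  | nil => intro x hx; simp at hx
  | cons x l ih =>
    intro y hy
    rcases List.mem_cons.mp hy with rfl | hyl
    · rfl
    · cases l with
      | nil => simp at hyl
      | cons z t =>
        have hxz : x = z := h (x, z) (by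
          rw [show (x :: z :: t).zip (x :: z :: t).tail = (x, z) :: ((z :: t).zip t) from rfl]
          exact List.mem_cons_self)
        have h' : ∀ p ∈ (z :: t).zip (z :: t).tail, p.1 = p.2 := by
          intro p hp
          apply h
          rw [show (x :: z :: t).zip (x :: z :: t).tail = (x, z) :: ((z :: t).zip t) from rfl]
          exact List.mem_cons_of_mem _ hp
        have := ih h' y hyl
        simpa [hxz] using this

lemma pv_split (R : Int → Int → Bool) :
    ∀ l : List Int, pvBadCount R l = 1 →
      ∃ v u, l = v ++ u ∧ v ≠ [] ∧ u ≠ [] ∧ pvAdj R v ∧ pvAdj R u ∧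
        R (v.getLastD 0) (u.headD 0) = false := by
  intro l
  induction l with
  | nil => intro h; simp [pvBadCount] at h
  | cons x l ih =>
    intro h
    cases l with
    | nil => simp [pvBadCount] at h
    | cons y l' =>
      unfold pvBadCount at h
      rw [show (x :: y :: l').zip (x :: y :: l').tail = (x, y) :: ((y :: l').zip l') from rfl,
        List.countP_cons] at h
      by_cases hxy : R x y = true
      · simp [hxy] at h
        have h' : pvBadCount R (y :: l') = 1 := by
          unfold pvBadCount
          simpa using h
        obtain ⟨v, u, heq, hv, hu, hcv, hcu, hbad⟩ := ih h'
        refine ⟨x :: v, u, by simp [heq], by simp, hu, ?_, hcu, ?_⟩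
        · intro p hp
          cases v with
          | nil => exact absurd rfl hv
          | cons w v' =>
            have hwy : w = y := by
              have := heq
              simp at this
              exact this.1.symm
            rw [show (x :: w :: v').zip (x :: w :: v').tail = (x, w) :: ((w :: v').zip v') from rfl] at hp
            rcases List.mem_cons.mp hp with rfl | hp'
            · rw [hwy]; exact hxy
            · exact hcv p hp'
        · rwa [pv_getLastD_cons x v hv]
      · have hxy' : R x y = false := by simpa using hxy
        simp [hxy'] at h
        have hch : pvAdj R (y :: l') := by
          rw [pv_adj_iff_count]
          unfold pvBadCount
          simpa using h
        exact ⟨[x], y :: l', rfl, by simp, by simp, by intro p hp; simp at hp, hch, by simpa using hxy'⟩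

/-- the core characterisation: `lst` has a nontrivial rotation equal to `t`
    (the unique `R`-ordered rearrangement of `lst`) iff `lst` is constant, or has
    exactly one adjacent `R`-violation and its last/first elements satisfy `R`. -/
lemma pv_rot_char (R : Int → Int → Bool)
    (htot : ∀ a b : Int, R a b = true ∨ R b a = true)
    (hanti : ∀ a b : Int, R a b = true → R b a = true → a = b)
    (htrans : ∀ a b c : Int, R a b = true → R b c = true → R a c = true)
    (lst t : List Int) (hperm : t.Perm lst)
    (hpw : t.Pairwise (fun a b => R a b = true))
    (hn : 2 ≤ lst.length) :
    (∃ k : Nat, 0 < k ∧ k < lst.length ∧ lst.drop k ++ lst.take k = t)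
    ↔ ((∀ p ∈ lst.zip lst.tail, p.1 = p.2)
       ∨ (pvBadCount R lst = 1 ∧ R (lst.getLastD 0) (lst.headD 0) = true)) := by
  have huniq : ∀ y : List Int, y.Perm lst → y.Pairwise (fun a b => R a b = true) → y = t :=
    fun y hyp hypw =>
      List.Perm.eq_of_pairwise (fun a b _ _ h1 h2 => hanti a b h1 h2) hypw hpw
        (hyp.trans hperm.symm)
  constructor
  · rintro ⟨k, hk0, hkn, hrot⟩
    have hvu := List.take_append_drop k lst
    have hv_ne : lst.take k ≠ [] := by
      apply List.ne_nil_of_length_pos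
      rw [List.length_take]; omega
    have hu_ne : lst.drop k ≠ [] := by
      apply List.ne_nil_of_length_pos
      rw [List.length_drop]; omega
    have hadj_uv : pvAdj R (lst.drop k ++ lst.take k) := by
      rw [hrot]; exact pv_adj_of_pairwise R t hpw
    have hzip := pv_zipTail_append (lst.drop k) (lst.take k) hu_ne hv_ne
    have hadj_u : pvAdj R (lst.drop k) := by
      intro p hp
      exact hadj_uv p (by rw [hzip]; exact List.mem_append_left _ hp)
    have hadj_v : pvAdj R (lst.take k) := by
      intro p hp
      exact hadj_uv p (by
        rw [hzip]
        exact List.mem_append_right _ (List.mem_cons_of_mem _ hp))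
    have hback : R ((lst.drop k).getLastD 0) ((lst.take k).headD 0) = true :=
      hadj_uv ((lst.drop k).getLastD 0, (lst.take k).headD 0)
        (by rw [hzip]; exact List.mem_append_right _ List.mem_cons_self)
    have hbl : R (lst.getLastD 0) (lst.headD 0) = true := by
      have h1 : lst.getLastD 0 = (lst.drop k).getLastD 0 := by
        conv_lhs => rw [← hvu]
        exact pv_getLastD_append _ _ hu_ne
      have h2 : lst.headD 0 = (lst.take k).headD 0 := by
        conv_lhs => rw [← hvu]
        exact pv_headD_append _ _ hv_ne
      rw [h1, h2]; exact hback
    have hcnt : pvBadCount R lst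
        = (if (!R ((lst.take k).getLastD 0) ((lst.drop k).headD 0)) = true then 1 else 0) := by
      unfold pvBadCount
      conv_lhs => rw [← hvu]
      rw [pv_zipTail_append (lst.take k) (lst.drop k) hv_ne hu_ne, List.countP_append,
        List.countP_cons]
      have hz1 : ((lst.take k).zip (lst.take k).tail).countP (fun p => !R p.1 p.2) = 0 := by
        have := (pv_adj_iff_count R (lst.take k)).mp hadj_v
        unfold pvBadCount at this
        exact this
      have hz2 : ((lst.drop k).zip (lst.drop k).tail).countP (fun p => !R p.1 p.2) = 0 := by
        have := (pv_adj_iff_count R (lst.drop k)).mp hadj_u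
        unfold pvBadCount at this
        exact this
      rw [hz1, hz2]
      simp
    by_cases hj : R ((lst.take k).getLastD 0) ((lst.drop k).headD 0) = true
    · left
      have hc0 : pvBadCount R lst = 0 := by rw [hcnt, hj]; simp
      have hadj_lst : pvAdj R lst := (pv_adj_iff_count R lst).mpr hc0
      have hne : lst ≠ [] := by
        apply List.ne_nil_of_length_pos; omega
      have hall := pv_all_eq R htrans hanti lst hne hadj_lst hbl
      intro p hp
      obtain ⟨hp1, hp2⟩ := List.of_mem_zip hp
      rw [hall p.1 hp1, hall p.2 (List.mem_of_mem_tail hp2)]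
    · right
      refine ⟨?_, hbl⟩
      have hjf : R ((lst.take k).getLastD 0) ((lst.drop k).headD 0) = false := by
        simpa using hj
      rw [hcnt, hjf]
      simp
  · rintro (hconst | ⟨hcnt, hback⟩)
    · have hne : lst ≠ [] := by apply List.ne_nil_of_length_pos; omega
      have hall : ∀ x ∈ lst, x = lst.headD 0 := pv_rep lst hconst
      have hrep : lst = List.replicate lst.length (lst.headD 0) :=
        List.eq_replicate_of_mem hall
      refine ⟨1, one_pos, by omega, ?_⟩
      have h1 : lst.drop 1 ++ lst.take 1 = lst := by
        conv_lhs => rw [hrep]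
        conv_rhs => rw [hrep]
        rw [List.drop_replicate, List.take_replicate, ← List.replicate_add]
        congr 1
        omega
      rw [h1]
      apply huniq lst (List.Perm.refl lst)
      apply pv_pairwise_of_adj R htrans
      intro p hp
      obtain ⟨hp1, hp2⟩ := List.of_mem_zip hp
      have he : p.1 = p.2 := by
        rw [hall p.1 hp1, hall p.2 (List.mem_of_mem_tail hp2)]
      rw [he]
      rcases htot p.2 p.2 with h | h <;> exact h
    · obtain ⟨v, u, heq, hv, hu, hav, hau, hbad⟩ := pv_split R lst hcnt
      refine ⟨v.length, by
        cases v with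
        | nil => exact absurd rfl hv
        | cons a t => simp, by
          rw [heq, List.length_append]
          cases u with
          | nil => exact absurd rfl hu
          | cons a t => simp, ?_⟩
      have hdt : lst.drop v.length ++ lst.take v.length = u ++ v := by
        rw [heq, List.drop_left, List.take_left]
      rw [hdt]
      apply huniq
      · rw [heq]; exact List.perm_append_comm
      · apply pv_pairwise_of_adj R htrans
        intro p hp
        rw [pv_zipTail_append u v hu hv] at hp
        rcases List.mem_append.mp hp with hp1 | hp2
        · exact hau p hp1
        · rcases List.mem_cons.mp hp2 with rfl | hp3
          · have h1 : u.getLastD 0 = lst.getLastD 0 := by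
              rw [heq]; exact (pv_getLastD_append v u hu).symm
            have h2 : v.headD 0 = lst.headD 0 := by
              rw [heq]; exact (pv_headD_append v u hv).symm
            show R (u.getLastD 0) (v.headD 0) = true
            rw [h1, h2]
            exact hback
          · exact hav p hp3

-- rotation arithmetic of the A port
lemma pv_rot_pos (lst : List Int) (k : Nat) (h1 : 1 ≤ k) (h2 : k < lst.length) :
    pyDequeRotate lst (k : Int)
      = lst.drop (lst.length - k) ++ lst.take (lst.length - k) := by
  have hne : ¬ lst.length = 0 := by omega
  have hmod : PySem.Int.mod (k : Int) (lst.length : Int) = (k : Int) := by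
    rw [PySem.Int.mod_eq_emod_of_pos (by omega : (0:Int) < lst.length)]
    exact Int.emod_eq_of_lt (by omega) (by exact_mod_cast h2)
  simp only [pyDequeRotate, if_neg hne, hmod, Int.toNat_natCast]

lemma pv_rot_neg (lst : List Int) (k : Nat) (h1 : 1 ≤ k) (h2 : k < lst.length) :
    pyDequeRotate lst (-(k : Int)) = lst.drop k ++ lst.take k := by
  have hne : ¬ lst.length = 0 := by omega
  have hmod : PySem.Int.mod (-(k : Int)) (lst.length : Int) = (lst.length : Int) - k := by
    rw [PySem.Int.mod_eq_emod_of_pos (by omega : (0:Int) < lst.length)]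
    have hh : (-(k : Int) + (lst.length : Int) * 1) % (lst.length : Int)
        = (-(k : Int)) % (lst.length : Int) := Int.add_mul_emod_self_left _ _ _
    have he : -(k : Int) + (lst.length : Int) * 1 = (lst.length : Int) - k := by ring
    rw [← hh, he]
    exact Int.emod_eq_of_lt (by omega) (by omega)
  have htn : ((lst.length : Int) - k).toNat = lst.length - k := by omega
  have hsub : lst.length - (lst.length - k) = k := by omega
  simp only [pyDequeRotate, if_neg hne, hmod, htn, hsub]

lemma pv_A_shape (lst : List Int) : check lst = "YES" ∨ check lst = "NO" := by
  simp only [check]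
  split
  · left; rfl
  · right; rfl

lemma pv_B_shape (lst : List Int) : check_alt lst = "YES" ∨ check_alt lst = "NO" := by
  simp only [check_alt]
  split
  · right; rfl
  · split
    · left; rfl
    · split
      · left; rfl
      · split
        · left; rfl
        · right; rfl

lemma pv_exists_symm (n : Nat) (P : Nat → Prop) :
    (∃ k, 0 < k ∧ k < n ∧ (P (n - k) ∨ P k)) ↔ (∃ k, 0 < k ∧ k < n ∧ P k) := by
  constructor
  · rintro ⟨k, hk0, hkn, hP | hP⟩
    · exact ⟨n - k, by omega, by omega, hP⟩
    · exact ⟨k, hk0, hkn, hP⟩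
  · rintro ⟨k, hk0, hkn, hP⟩
    exact ⟨k, hk0, hkn, Or.inr hP⟩

lemma pv_A_yes (lst : List Int) (hn : 2 ≤ lst.length) :
    check lst = "YES" ↔
      ((∃ k : Nat, 0 < k ∧ k < lst.length ∧
          lst.drop k ++ lst.take k = PySem.List.sorted lst (fun v => v))
       ∨ (∃ k : Nat, 0 < k ∧ k < lst.length ∧
          lst.drop k ++ lst.take k = PySem.List.sorted lst (fun v => v) true)) := by
  have hany : check lst = "YES" ↔
      ((PySem.List.pyRange 1 (lst.length : Int) 1).any (fun i =>
        decide (pyDequeRotate lst i ∈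
          [PySem.List.sorted lst (fun v => v), PySem.List.sorted lst (fun v => v) true]) ||
        decide (pyDequeRotate lst (-i) ∈
          [PySem.List.sorted lst (fun v => v), PySem.List.sorted lst (fun v => v) true]))) = true := by
    simp only [check]
    split
    · next h => simpa using h
    · next h =>
      constructor
      · intro hc; exact absurd hc (by decide)
      · intro hc; exact absurd hc (by simpa using h)
  rw [hany, List.any_eq_true]
  have hstep : (∃ i ∈ PySem.List.pyRange 1 (lst.length : Int) 1,
      (decide (pyDequeRotate lst i ∈
          [PySem.List.sorted lst (fun v => v), PySem.List.sorted lst (fun v => v) true]) ||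
        decide (pyDequeRotate lst (-i) ∈
          [PySem.List.sorted lst (fun v => v), PySem.List.sorted lst (fun v => v) true])) = true)
      ↔ (∃ k : Nat, 0 < k ∧ k < lst.length ∧
          ((lst.drop (lst.length - k) ++ lst.take (lst.length - k)
              = PySem.List.sorted lst (fun v => v)
            ∨ lst.drop (lst.length - k) ++ lst.take (lst.length - k)
              = PySem.List.sorted lst (fun v => v) true)
           ∨ (lst.drop k ++ lst.take k = PySem.List.sorted lst (fun v => v)
            ∨ lst.drop k ++ lst.take k = PySem.List.sorted lst (fun v => v) true))) := by
    constructor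
    · rintro ⟨i, hmem, hpred⟩
      obtain ⟨hi1, hi2⟩ := PySem.List.mem_pyRange_one.mp hmem
      have hik : i = ((i.toNat : Nat) : Int) := (Int.toNat_of_nonneg (by omega)).symm
      have hk1 : 1 ≤ i.toNat := by omega
      have hk2 : i.toNat < lst.length := by omega
      rw [hik, pv_rot_pos lst i.toNat hk1 hk2, pv_rot_neg lst i.toNat hk1 hk2] at hpred
      simp only [Bool.or_eq_true, decide_eq_true_eq, List.mem_cons,
        List.mem_singleton, List.not_mem_nil, or_false] at hpred
      exact ⟨i.toNat, by omega, hk2, hpred⟩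
    · rintro ⟨k, hk0, hkn, hP⟩
      refine ⟨(k : Int), PySem.List.mem_pyRange_one.mpr ⟨by omega, by exact_mod_cast hkn⟩, ?_⟩
      rw [pv_rot_pos lst k (by omega) hkn, pv_rot_neg lst k (by omega) hkn]
      simp only [Bool.or_eq_true, decide_eq_true_eq, List.mem_cons,
        List.mem_singleton, List.not_mem_nil, or_false]
      exact hP
  rw [hstep]
  rw [pv_exists_symm lst.length (fun k =>
    lst.drop k ++ lst.take k = PySem.List.sorted lst (fun v => v)
    ∨ lst.drop k ++ lst.take k = PySem.List.sorted lst (fun v => v) true)]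
  constructor
  · rintro ⟨k, hk0, hkn, h | h⟩
    · exact Or.inl ⟨k, hk0, hkn, h⟩
    · exact Or.inr ⟨k, hk0, hkn, h⟩
  · rintro (⟨k, hk0, hkn, h⟩ | ⟨k, hk0, hkn, h⟩)
    · exact ⟨k, hk0, hkn, Or.inl h⟩
    · exact ⟨k, hk0, hkn, Or.inr h⟩

lemma pv_fold (ps : List (Int × Int)) : ∀ d0 a0 : Int,
    ps.foldl (fun (p : Int × Int) (xy : Int × Int) =>
        if xy.2 < xy.1 then (p.1 + 1, p.2)
        else if xy.1 < xy.2 then (p.1, p.2 + 1)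
        else p) (d0, a0)
      = (d0 + (ps.countP (fun p => decide (p.2 < p.1)) : Int),
         a0 + (ps.countP (fun p => decide (p.1 < p.2)) : Int)) := by
  induction ps with
  | nil => intro d0 a0; simp
  | cons q ps ih =>
    intro d0 a0
    rw [List.foldl_cons, List.countP_cons, List.countP_cons]
    by_cases h1 : q.2 < q.1
    · have h2 : ¬ q.1 < q.2 := by omega
      simp [h1, h2, ih, Prod.ext_iff]
      all_goals omega
    · by_cases h2 : q.1 < q.2
      · simp [h1, h2, ih, Prod.ext_iff]
        all_goals omega
      · simp [h1, h2, ih, Prod.ext_iff]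
        all_goals omega
  
lemma pv_const_iff (lst : List Int) :
    ((lst.zip lst.tail).countP (fun p => decide (p.2 < p.1)) = 0
      ∧ (lst.zip lst.tail).countP (fun p => decide (p.1 < p.2)) = 0)
    ↔ (∀ p ∈ lst.zip lst.tail, p.1 = p.2) := by
  rw [List.countP_eq_zero, List.countP_eq_zero]
  constructor
  · rintro ⟨h1, h2⟩ p hp
    have := h1 p hp
    have := h2 p hp
    simp at *
    omega
  · intro h
    constructor <;> intro p hp <;> have := h p hp <;> simp [this]

lemma pv_B_yes (lst : List Int) (hn : 2 ≤ lst.length) :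
    check_alt lst = "YES" ↔
      ((∀ p ∈ lst.zip lst.tail, p.1 = p.2)
       ∨ ((lst.zip lst.tail).countP (fun p => decide (p.2 < p.1)) = 1
          ∧ lst.getLastD 0 ≤ lst.headD 0)
       ∨ ((lst.zip lst.tail).countP (fun p => decide (p.1 < p.2)) = 1
          ∧ lst.headD 0 ≤ lst.getLastD 0)) := by
  have hne : lst ≠ [] := by apply List.ne_nil_of_length_pos; omega
  have hnl : ¬ lst.length < 2 := by omega
  have hgd : PySem.List.pyGetD lst (-1) 0 = lst.getLastD 0 := by
    rw [PySem.List.pyGetD_neg_one lst 0 hne]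
    exact pv_getLast_eq_getLastD lst hne
  have hg0 : PySem.List.pyGetD lst 0 0 = lst.headD 0 := by
    rw [PySem.List.pyGetD_zero]
    cases lst with
    | nil => rfl
    | cons a t => rfl
  simp only [check_alt, if_neg hnl, List.drop_one, pv_fold, hgd, hg0, zero_add]
  have hcast0 : ∀ c : Nat, ((c : Int) = 0) = (c = 0) := by intro c; simp
  have hcast1 : ∀ c : Nat, ((c : Int) = 1) = (c = 1) := by intro c; simp
  split_ifs with h1 h2 h3
  · simp only [hcast0] at h1
    have hconst := (pv_const_iff lst).mp h1
    constructor
    · intro _; exact Or.inl hconst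
    · intro _; rfl
  · simp only [hcast1] at h2
    constructor
    · intro _; exact Or.inr (Or.inl h2)
    · intro _; rfl
  · simp only [hcast1] at h3
    constructor
    · intro _; exact Or.inr (Or.inr h3)
    · intro _; rfl
  · simp only [hcast0] at h1
    simp only [hcast1] at h2 h3
    constructor
    · intro hc; exact absurd hc (by decide)
    · rintro (hconst | hx | hx)
      · exact absurd ((pv_const_iff lst).mpr hconst) h1
      · exact absurd hx h2
      · exact absurd hx h3

lemma pv_count_desc (lst : List Int) :
    pvBadCount (fun a b => decide (a ≤ b)) lst
      = (lst.zip lst.tail).countP (fun p => decide (p.2 < p.1)) := by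
  unfold pvBadCount
  apply List.countP_congr
  intro p _
  by_cases h : p.2 < p.1
  · have h' : ¬ p.1 ≤ p.2 := by omega
    simp [h, h']
  · have h' : p.1 ≤ p.2 := by omega
    simp [h, h']

lemma pv_count_asc (lst : List Int) :
    pvBadCount (fun a b => decide (b ≤ a)) lst
      = (lst.zip lst.tail).countP (fun p => decide (p.1 < p.2)) := by
  unfold pvBadCount
  apply List.countP_congr
  intro p _
  by_cases h : p.1 < p.2
  · have h' : ¬ p.2 ≤ p.1 := by omega
    simp [h, h']
  · have h' : p.2 ≤ p.1 := by omega
    simp [h, h']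

lemma pv_main (lst : List Int) : check lst = check_alt lst := by
  by_cases hn : 2 ≤ lst.length
  · have h1 := pv_rot_char (fun a b => decide (a ≤ b))
      (by intro a b; simp; omega)
      (by intro a b h1 h2; simp at h1 h2; omega)
      (by intro a b c h1 h2; simp at h1 h2 ⊢; omega)
      lst (PySem.List.sorted lst (fun v => v))
      (PySem.List.sorted_perm lst (fun v => v) false)
      ((PySem.List.sorted_pairwise lst (fun v => v)).imp (by intro a b h; simpa using h))
      hn
    have h2 := pv_rot_char (fun a b => decide (b ≤ a))
      (by intro a b; simp; omega)
      (by intro a b h1 h2; simp at h1 h2; omega)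
      (by intro a b c h1 h2; simp at h1 h2 ⊢; omega)
      lst (PySem.List.sorted lst (fun v => v) true)
      (PySem.List.sorted_perm lst (fun v => v) true)
      ((PySem.List.sorted_pairwise_rev lst (fun v => v)).imp (by intro a b h; simpa using h))
      hn
    rw [pv_count_desc, pv_count_asc] at *
    have hiff : check lst = "YES" ↔ check_alt lst = "YES" := by
      rw [pv_A_yes lst hn, pv_B_yes lst hn, h1, h2]
      simp only [decide_eq_true_eq]
      tauto
    rcases pv_A_shape lst with hA | hA
    · rw [hA, hiff.mp hA]
    · rcases pv_B_shape lst with hB | hB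
      · have := hiff.mpr hB
        rw [hA] at this
        exact absurd this (by decide)
      · rw [hA, hB]
  · have hA : check lst = "NO" := by
      simp only [check]
      have hr : PySem.List.pyRange 1 (lst.length : Int) 1 = [] :=
        PySem.List.pyRange_one_eq_nil (by push_cast; omega)
      rw [hr]
      simp
    have hB : check_alt lst = "NO" := by
      simp only [check_alt]
      rw [if_pos (by omega)]
    rw [hA, hB]

-- ===== VERDICT (by name: the statement is the Claim_ definition above) =====
theorem check_spec : Claim_equal_check := by
  intro lst _
  unfold Spec_check
  exact pv_main lst
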